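-- pv_equiv track=rewrite | github.com/pypi-data/pypi-mirror-366 | packages/socialmapper/socialmapper-0.7.0-py3-none-any.whl/socialmapper/census/services/census_service.py | _group_geoids_by_state
-- ===== SOURCE A (Python) =====
-- def _group_geoids_by_state(geoids: list[str]) -> dict[str, list[str]]:
--     """Group GEOIDs by state for efficient API calls."""
--     state_groups = {}
--
--     for geoid in geoids:
--         if len(geoid) >= 2:
--             state_fips = geoid[:2]
--             if state_fips not in state_groups:
--                 state_groups[state_fips] = []
--             state_groups[state_fips].append(geoid)
--
--     return state_groups
-- ===== SOURCE B (Python) =====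
-- def _group_geoids_by_state(geoids: list[str]) -> dict[str, list[str]]:
--     """Group GEOIDs by state for efficient API calls."""
--     valid = [g for g in geoids if len(g) >= 2]
--     keys = list(dict.fromkeys(g[:2] for g in valid))
--     return {k: [g for g in valid if g[:2] == k] for k in keys}
-- ===== Notes on version B (the rewrite author's own statement) =====
-- stated objective: alternative
-- what changed: Replaces the single mutate-a-dict-as-you-go loop with a declarative pipeline: filter the valid geoids, take the ordered-deduplicated list of two-char prefixes, and build each group by a per-key filter comprehension.
import Mathlib
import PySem

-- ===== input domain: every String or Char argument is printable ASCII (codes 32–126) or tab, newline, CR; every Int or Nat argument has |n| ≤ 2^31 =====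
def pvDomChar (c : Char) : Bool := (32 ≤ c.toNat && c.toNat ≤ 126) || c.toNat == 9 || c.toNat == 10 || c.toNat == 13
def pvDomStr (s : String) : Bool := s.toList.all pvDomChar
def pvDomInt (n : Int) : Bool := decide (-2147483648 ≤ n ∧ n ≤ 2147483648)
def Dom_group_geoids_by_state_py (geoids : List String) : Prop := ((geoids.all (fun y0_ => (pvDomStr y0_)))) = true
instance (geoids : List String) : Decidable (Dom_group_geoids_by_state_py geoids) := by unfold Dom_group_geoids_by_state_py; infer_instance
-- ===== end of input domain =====

-- B replaces A's mutate-a-dict-as-you-go loop by a declarative pipeline (filter valid geoids,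
-- ordered-deduplicate the two-char prefixes, build each group by a per-key filter); same result, alternative structure.


-- ===== PORT A =====
def group_geoids_by_state_py (geoids : List String) : List (String × List String) :=
  (geoids.foldl
    (fun (state_groups : PySem.Dict String (List String)) geoid =>
      if 2 ≤ PySem.Str.len geoid then
        let state_fips := PySem.Str.slice geoid none (some 2)
        let state_groups :=
          if state_groups.contains state_fips then state_groups
          else state_groups.insert state_fips []          -- state_groups[state_fips] = []
        state_groups.modify state_fips [] (fun l => l ++ [geoid])  -- .append(geoid)
      else state_groups)
    PySem.Dict.empty).items

-- ===== PORT B =====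
def group_geoids_by_state_py_alt (geoids : List String) : List (String × List String) :=
  let valid := geoids.filter (fun g => 2 ≤ PySem.Str.len g)
  let keys := PySem.List.dedup (valid.map (fun g => PySem.Str.slice g none (some 2)))
  keys.map (fun k => (k, valid.filter (fun g => PySem.Str.slice g none (some 2) == k)))

-- ===== PRECONDITION & SPEC =====
def Spec_group_geoids_by_state_py (geoids : List String) (out : List (String × List String)) : Prop := out = group_geoids_by_state_py_alt geoids
instance (geoids : List String) (out : List (String × List String)) : Decidable (Spec_group_geoids_by_state_py geoids out) := by unfold Spec_group_geoids_by_state_py; infer_instance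

-- ===== CLAIM (what is proved, stated in full; the proofs are below) =====
def Claim_equal_group_geoids_by_state_py : Prop := ∀ (geoids : List String), Dom_group_geoids_by_state_py geoids → Spec_group_geoids_by_state_py geoids (group_geoids_by_state_py geoids)

-- ===== LEMMAS AND PROOFS =====

-- A's "if absent, insert []; then append" is one `modify` with default [].
theorem insert_modify_eq_modify (d : PySem.Dict String (List String)) (k : String)
    (f : List String → List String) :
    ((if d.contains k then d else d.insert k []).modify k [] f) = d.modify k [] f := by
  by_cases h : d.contains k = true
  · simp [h]
  · simp only [Bool.not_eq_true] at h
    simp only [h, Bool.false_eq_true, if_false]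
    have hg : (d.insert k []).getD k [] = [] := PySem.Dict.getD_insert_self _ _ _ _
    have hd : d.getD k [] = [] := PySem.Dict.getD_of_not_contains d [] h
    simp [PySem.Dict.modify, hg, hd, PySem.Dict.insert_insert_self]

theorem group_geoids_by_state_py_spec : Claim_equal_group_geoids_by_state_py := by
  intro geoids _
  unfold Spec_group_geoids_by_state_py group_geoids_by_state_py group_geoids_by_state_py_alt
  set key : String → String := fun g => PySem.Str.slice g none (some 2) with hkey
  set valid : List String := geoids.filter (fun g => 2 ≤ PySem.Str.len g) with hvalid
  -- 1. the guarded fold over geoids is the unguarded fold over `valid`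
  have h1 : (geoids.foldl
      (fun (state_groups : PySem.Dict String (List String)) geoid =>
        if 2 ≤ PySem.Str.len geoid then
          let state_fips := key geoid
          let state_groups :=
            if state_groups.contains state_fips then state_groups
            else state_groups.insert state_fips []
          state_groups.modify state_fips [] (fun l => l ++ [geoid])
        else state_groups)
      PySem.Dict.empty) =
      valid.foldl (fun d g => d.modify (key g) [] (fun l => l ++ [g])) PySem.Dict.empty := by
    rw [hvalid, List.foldl_filter]
    apply PySem.List.foldl_congr_mem
    intro d g _
    by_cases hg : 2 ≤ PySem.Str.len g
    · simp only [hg, decide_true, if_true]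
      exact insert_modify_eq_modify d (key g) (fun l => l ++ [g])
    · simp only [hg, decide_false, Bool.false_eq_true, if_false]
  rw [h1]
  set D : PySem.Dict String (List String) :=
    valid.foldl (fun d g => d.modify (key g) [] (fun l => l ++ [g])) PySem.Dict.empty with hD
  -- 2. D's keys are the ordered-deduplicated prefixes
  have hkeys : D.keys = PySem.List.dedup (valid.map key) := by
    rw [hD, PySem.Dict.keys_foldl_modify_key valid key [] (fun _ g => fun l => l ++ [g])]
    simp [PySem.List.dedup_eq_ofList, PySem.Set.update, PySem.Set.ofList, PySem.Dict.keys_empty]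
  have hnodup : D.keys.Nodup := by
    rw [hkeys]; exact PySem.List.nodup_dedup _
  -- 3. D's value at k is the per-key filter of valid
  have hval : ∀ k, D.getD k [] = valid.filter (fun g => key g == k) := by
    intro k
    have hm : D = (valid.map (fun g => (key g, g))).foldl
        (fun d p => d.modify p.1 [] (fun l => l ++ [p.2])) PySem.Dict.empty := by
      rw [hD, List.foldl_map]
    rw [hm, PySem.Dict.getD_foldl_modify_append]
    simp [List.filter_map, Function.comp_def]
  rw [PySem.Dict.items_eq_map_keys D hnodup [], hkeys]
  exact List.map_congr_left (fun k _ => by rw [hval k])
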